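-- pv_equiv track=rewrite | github.com/SheldonHH/algorithm-journey | src/class071/C5_ReverseArraySubarrayMaxSum.py | max_sum_reverse2
-- ===== SOURCE A (Python) =====
-- from typing import List
--
-- def max_sum_reverse2(nums: List[int]) -> int:
--     # 正式方法，时间复杂度O(n)
--     n = len(nums)
--     start = [0] * n
--     start[-1] = nums[-1]
--     for i in range(n-2, -1, -1):
--         start[i] = max(nums[i], nums[i] + start[i + 1])
--     ans = start[0]
--     end = max_end = nums[0]
--     for i in range(1, n):
--         ans = max(ans, max_end + start[i])
--         end = max(nums[i], end + nums[i])
--         max_end = max(max_end, end)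
--     return max(ans, max_end)
-- ===== SOURCE B (Python) =====
-- from typing import List
--
-- def max_sum_reverse2(nums: List[int]) -> int:
--     # reduce to prefix sums: any subarray sum is a difference P[j] - P[i] with i < j
--     P = [0]
--     for x in nums:
--         P.append(P[-1] + x)
--     # left[k-1] = best P[b] - P[a] with a < b <= k  (best subarray inside nums[:k]),
--     # via a running minimum of prefix sums
--     left = []
--     mn = P[0]
--     for p in P[1:]:
--         cand = p - mn
--         left.append(cand if not left else max(left[-1], cand))
--         mn = min(mn, p)
--     # rightFrom[k] = best P[j] - P[i] with k <= i < j  (best subarray starting at >= k),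
--     # via a backward running maximum of prefix sums and a running best
--     rev = []
--     mx = None
--     rbest = None
--     for p in reversed(P):
--         if mx is None:
--             mx = p
--         else:
--             cand = mx - p
--             rbest = cand if rbest is None else max(rbest, cand)
--             rev.append(rbest)
--             mx = max(mx, p)
--     rightFrom = rev[::-1]
--     # combine: best single subarray, or best left part + best part starting after it
--     ans = left[-1]
--     for l, r in zip(left, rightFrom[1:]):
--         ans = max(ans, l + r)
--     return ans
-- ===== Notes on version B (the rewrite author's own statement) =====
-- stated objective: alternative
-- what changed: B replaces A's Kadane and suffix-DP recurrences by a prefix-sum reduction: every subarray sum becomes a difference of prefix sums, the best left part comes from a forward running minimum of prefix sums, the best part starting at >= k from a backward running maximum with a running best, combined in a final zip pass.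
import Mathlib
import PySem

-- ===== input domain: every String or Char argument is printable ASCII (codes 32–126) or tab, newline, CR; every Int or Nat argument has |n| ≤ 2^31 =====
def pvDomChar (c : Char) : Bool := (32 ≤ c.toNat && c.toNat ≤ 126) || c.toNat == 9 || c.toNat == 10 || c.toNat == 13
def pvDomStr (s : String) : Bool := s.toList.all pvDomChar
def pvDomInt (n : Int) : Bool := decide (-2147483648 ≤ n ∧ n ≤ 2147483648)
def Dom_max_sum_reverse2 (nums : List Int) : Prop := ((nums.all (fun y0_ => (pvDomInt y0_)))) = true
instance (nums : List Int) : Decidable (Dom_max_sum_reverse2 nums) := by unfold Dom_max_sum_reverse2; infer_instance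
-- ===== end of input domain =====

-- B recasts the task in prefix sums (running min / backward running max of prefix
-- sums, no Kadane or suffix-DP recurrences); equivalence of the return value is
-- proved on nonempty lists (Python A raises IndexError on []).

-- ===== PORT A =====
-- the downward loop of A fills the suffix array start (last cell = last element);
-- the right-to-left recursion below computes exactly those cells in the same order.
def pvStart : List Int → List Int
  | [] => []
  | [x] => [x]
  | x :: y :: r =>
      let s := pvStart (y :: r)
      max x (x + s.headI) :: s

-- the forward loop 'for i in range(1, n)': reads nums[i] and start[i] in step,
-- carrying (ans, end, max_end); here the two lists are consumed in lockstep.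
def pvLoopA : List Int → List Int → Int → Int → Int → Int × Int × Int
  | y :: ys, s :: ss, ans, e, me =>
      let ans' := max ans (me + s)
      let e' := max y (e + y)
      pvLoopA ys ss ans' e' (max me e')
  | _, _, ans, e, me => (ans, e, me)

def max_sum_reverse2 (nums : List Int) : Int :=
  match nums with
  | [] => 0  -- Python raises IndexError here (last cell of an empty array); excluded by Pre_
  | x :: rest =>
      let start := pvStart (x :: rest)
      let r := pvLoopA rest start.tail start.headI x x
      max r.1 r.2.2

-- ===== PORT B =====
-- B's first loop: P = [0]; for x in nums: P.append(P[-1] + x)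
def pvPrefP (nums : List Int) : List Int :=
  nums.foldl (fun P x => P ++ [P.getLastD 0 + x]) [0]

-- B's left loop body: cand = p - mn; append running max; mn = min(mn, p)
def pvLeftStep (st : List Int × Int) (p : Int) : List Int × Int :=
  let cand := p - st.2
  (st.1 ++ [if st.1.isEmpty then cand else max (st.1.getLastD 0) cand], min st.2 p)

-- B's left loop over P[1:], state (left, mn) with mn seeded from P[0]
def pvLeft (P : List Int) : List Int :=
  ((P.drop 1).foldl pvLeftStep ([], P.headD 0)).1

-- B's backward loop body: mx is None on the first element, afterwards keep
-- (mx, rbest, rev) exactly as the Python does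
def pvRevStep (st : Option Int × Option Int × List Int) (p : Int) :
    Option Int × Option Int × List Int :=
  match st.1 with
  | none => (some p, st.2.1, st.2.2)
  | some mx =>
      let cand := mx - p
      let rbest := match st.2.1 with | none => cand | some rb => max rb cand
      (some (max mx p), some rbest, st.2.2 ++ [rbest])

-- B's loop 'for p in reversed(P)', keeping the rev list it appends to
def pvRev (P : List Int) : List Int :=
  (P.reverse.foldl pvRevStep (none, none, [])).2.2

def max_sum_reverse2_alt (nums : List Int) : Int :=
  let P := pvPrefP nums
  let left := pvLeft P
  let rightFrom := (pvRev P).reverse   -- rev[::-1]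
  -- ans = left[-1] (Python raises IndexError on []; excluded by Pre_), then the zip pass
  (left.zip (rightFrom.drop 1)).foldl (fun ans p => max ans (p.1 + p.2)) (left.getLastD 0)

-- ===== PRECONDITION & SPEC =====
-- Pre_ excludes only the empty list, on which Python A raises IndexError.
def Pre_max_sum_reverse2 (nums : List Int) : Prop := nums ≠ []
instance (nums : List Int) : Decidable (Pre_max_sum_reverse2 nums) := by
  unfold Pre_max_sum_reverse2; infer_instance
def pvWitness_max_sum_reverse2 : List Int := [1, -2, 3]

def Spec_max_sum_reverse2 (nums : List Int) (out : Int) : Prop := out = max_sum_reverse2_alt nums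
instance (nums : List Int) (out : Int) : Decidable (Spec_max_sum_reverse2 nums out) := by
  unfold Spec_max_sum_reverse2; infer_instance

-- ===== CLAIM (what is proved, stated in full; the proofs are below) =====
def Claim_equal_max_sum_reverse2 : Prop :=
  ∀ (nums : List Int), Dom_max_sum_reverse2 nums → Pre_max_sum_reverse2 nums →
    Spec_max_sum_reverse2 nums (max_sum_reverse2 nums)

-- ===== LEMMAS AND PROOFS =====

-- ---- A-side basics ----

theorem pvStart_ne_nil (x : Int) (r : List Int) : pvStart (x :: r) ≠ [] := by
  cases r <;> simp [pvStart]

theorem pvStart_length (l : List Int) : (pvStart l).length = l.length := by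
  induction l with
  | nil => rfl
  | cons x r ih =>
      cases r with
      | nil => rfl
      | cons y r' => simp [pvStart] at ih ⊢; omega

theorem pvStart_tail (x : Int) (r : List Int) : (pvStart (x :: r)).tail = pvStart r := by
  cases r <;> simp [pvStart]

-- me-trajectory of A's loop
def melist : Int → Int → List Int → List Int
  | _, _, [] => []
  | e, me, y :: ys =>
      let e' := max y (e + y)
      max me e' :: melist e' (max me e') ys

-- common reference: max of all cross terms me_{i-1}+s_i and the final max_end
def refmax : List Int → List Int → Int → Int → Int
  | y :: ys, s :: ss, e, me =>
      let e' := max y (e + y)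
      max (me + s) (refmax ys ss e' (max me e'))
  | _, _, _, me => me

theorem refmax_ge_me (ys ss : List Int) (e me : Int) : me ≤ refmax ys ss e me := by
  induction ys generalizing ss e me with
  | nil => cases ss <;> simp [refmax]
  | cons y ys ih =>
      cases ss with
      | nil => simp [refmax]
      | cons s ss =>
          simp only [refmax]
          have h := ih ss (max y (e + y)) (max me (max y (e + y)))
          omega

-- A's loop computes max ans (refmax …)
theorem loopA_refmax (ys ss : List Int) (ans e me : Int) :
    max (pvLoopA ys ss ans e me).1 (pvLoopA ys ss ans e me).2.2 = max ans (refmax ys ss e me) := by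
  induction ys generalizing ss ans e me with
  | nil => cases ss <;> simp [pvLoopA, refmax]
  | cons y ys ih =>
      cases ss with
      | nil => simp [pvLoopA, refmax]
      | cons s ss =>
          simp only [pvLoopA, refmax]
          rw [ih]
          omega

-- the redundant start[0] seed of A is dominated by refmax
theorem start_le_refmax (ys : List Int) (e me : Int) (h : ys ≠ []) :
    e + (pvStart ys).headI ≤ refmax ys (pvStart ys) e me := by
  induction ys generalizing e me with
  | nil => exact absurd rfl h
  | cons y ys' ih =>
      cases ys' with
      | nil =>
          simp only [pvStart, refmax, List.headI]
          have : refmax [] [] (max y (e + y)) (max me (max y (e + y))) = max me (max y (e + y)) := rfl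
          omega
      | cons z r =>
          obtain ⟨a, t, hh⟩ : ∃ a t, pvStart (z :: r) = a :: t := by
            cases hh : pvStart (z :: r) with
            | nil => exact absurd hh (pvStart_ne_nil z r)
            | cons a t => exact ⟨a, t, rfl⟩
          have hia := ih (max y (e + y)) (max me (max y (e + y))) (by simp)
          have hme := refmax_ge_me (z :: r) (pvStart (z :: r)) (max y (e + y))
            (max me (max y (e + y)))
          simp only [pvStart, hh, List.headI, refmax] at hia hme ⊢
          omega

-- A's result as refmax
theorem A_eq_refmax (x : Int) (rest : List Int) :
    max_sum_reverse2 (x :: rest) = refmax rest (pvStart rest) x x := by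
  show max (pvLoopA rest (pvStart (x :: rest)).tail (pvStart (x :: rest)).headI x x).1
        (pvLoopA rest (pvStart (x :: rest)).tail (pvStart (x :: rest)).headI x x).2.2
      = refmax rest (pvStart rest) x x
  rw [pvStart_tail]
  rw [loopA_refmax rest (pvStart rest) (pvStart (x :: rest)).headI x x]
  cases rest with
  | nil => simp [pvStart, refmax, List.headI]
  | cons y r =>
      obtain ⟨a, t, hh⟩ : ∃ a t, pvStart (y :: r) = a :: t := by
        cases hh : pvStart (y :: r) with
        | nil => exact absurd hh (pvStart_ne_nil y r)
        | cons a t => exact ⟨a, t, rfl⟩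
      have h1 := start_le_refmax (y :: r) x x (by simp)
      have h2 := refmax_ge_me (y :: r) (pvStart (y :: r)) x x
      simp only [pvStart, hh, List.headI] at h1 h2 ⊢
      omega

-- ---- prefix sums ----

-- tail of the prefix-sum list starting after the running value p
def tailPsums : Int → List Int → List Int
  | _, [] => []
  | p, y :: r => (p + y) :: tailPsums (p + y) r

theorem pvPrefP_fold (nums acc : List Int) (a : Int) (h : acc.getLastD 0 = a) :
    nums.foldl (fun P x => P ++ [P.getLastD 0 + x]) acc = acc ++ tailPsums a nums := by
  induction nums generalizing acc a with
  | nil => simp [tailPsums]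
  | cons x r ih =>
      simp only [List.foldl_cons, tailPsums]
      rw [ih (acc ++ [acc.getLastD 0 + x]) (a + x) (by rw [List.getLastD_concat, h]), h]
      simp

theorem pvPrefP_eq (nums : List Int) : pvPrefP nums = 0 :: tailPsums 0 nums := by
  unfold pvPrefP
  exact pvPrefP_fold nums [0] 0 rfl

theorem tailPsums_map (ys : List Int) (p c : Int) :
    tailPsums (c + p) ys = (tailPsums p ys).map (c + ·) := by
  induction ys generalizing p with
  | nil => rfl
  | cons y r ih => simp only [tailPsums, List.map_cons, ← ih, add_assoc]

-- ---- left pass = me-trajectory ----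

theorem pvLeft_fold (ys : List Int) (p e me : Int) (acc : List Int)
    (hne : acc ≠ []) (hlast : acc.getLastD 0 = me) :
    ((tailPsums p ys).foldl pvLeftStep (acc, p - max e 0)).1 = acc ++ melist e me ys := by
  induction ys generalizing p e me acc with
  | nil => simp [tailPsums, melist]
  | cons y r ih =>
      have hE : acc.isEmpty = false := by simp [hne]
      have hcand : p + y - (p - max e 0) = max y (e + y) := by omega
      have hmn : min (p - max e 0) (p + y) = (p + y) - max (max y (e + y)) 0 := by omega
      simp only [tailPsums, List.foldl_cons, pvLeftStep, hcand, hmn]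
      rw [show (if acc.isEmpty = true then max y (e + y)
              else max (acc.getLastD 0) (max y (e + y))) = max me (max y (e + y)) from by
            rw [hE, hlast]; simp]
      rw [ih (p + y) (max y (e + y)) (max me (max y (e + y)))
            (acc ++ [max me (max y (e + y))]) (by simp) (by simp)]
      simp [melist]

theorem pvLeft_eq (x : Int) (rest : List Int) :
    pvLeft (0 :: tailPsums 0 (x :: rest)) = x :: melist x x rest := by
  unfold pvLeft
  simp only [List.drop_one, List.tail_cons, List.headD_cons]
  show ((tailPsums 0 (x :: rest)).foldl pvLeftStep ([], 0)).1 = _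
  simp only [tailPsums, zero_add, List.foldl_cons, pvLeftStep]
  have h1 : x - (0 : Int) = x := by omega
  have h2 : min (0 : Int) x = x - max x 0 := by omega
  simp only [List.isEmpty_nil, List.nil_append, h1, h2]
  exact pvLeft_fold rest x x x [x] (by simp) (by simp)

-- ---- backward pass = suffix maxima of pvStart ----

-- suffix-maximum list
def sufmax : List Int → List Int
  | [] => []
  | [s] => [s]
  | s :: s' :: t => max s (sufmax (s' :: t)).headI :: sufmax (s' :: t)

theorem sufmax_length (l : List Int) : (sufmax l).length = l.length := by
  induction l with
  | nil => rfl
  | cons s t ih =>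
      cases t with
      | nil => rfl
      | cons s' t' => simp [sufmax] at ih ⊢; omega

theorem sufmax_headI_mem (l : List Int) (h : l ≠ []) : (sufmax l).headI ∈ l := by
  induction l with
  | nil => exact absurd rfl h
  | cons s t ih =>
      cases t with
      | nil => simp [sufmax]
      | cons s' t' =>
          have hm := ih (by simp)
          rw [show sufmax (s :: s' :: t')
                = max s (sufmax (s' :: t')).headI :: sufmax (s' :: t') from rfl,
             List.headI_cons]
          rcases le_total s (sufmax (s' :: t')).headI with hle | hle
          · rw [max_eq_right hle]; exact List.mem_cons_of_mem _ hm
          · rw [max_eq_left hle]; exact List.mem_cons_self ..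

-- max of the prefix-sum list psums 0 nums
def pmax : List Int → Int
  | [] => 0
  | x :: r => max 0 (x + pmax r)

-- head of pvStart in prefix-sum terms
theorem pvStart_headI (x : Int) (rest : List Int) :
    (pvStart (x :: rest)).headI = x + pmax rest := by
  induction rest generalizing x with
  | nil => simp [pvStart, pmax]
  | cons y r ih =>
      rw [show pvStart (x :: y :: r)
            = max x (x + (pvStart (y :: r)).headI) :: pvStart (y :: r) from rfl,
         List.headI_cons, ih y]
      simp only [pmax]
      omega

-- shift-equivariance of the backward scan
theorem pvRev_shift (L : List Int) (c : Int) (mx rb : Option Int) (rev : List Int) :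
    (L.map (c + ·)).foldl pvRevStep (mx.map (c + ·), rb, rev)
      = ((L.foldl pvRevStep (mx, rb, rev)).1.map (c + ·),
         (L.foldl pvRevStep (mx, rb, rev)).2.1,
         (L.foldl pvRevStep (mx, rb, rev)).2.2) := by
  induction L generalizing mx rb rev with
  | nil => rfl
  | cons p L ih =>
      cases mx with
      | none => simpa [pvRevStep] using ih (some p) rb rev
      | some m =>
          simp only [List.map_cons, List.foldl_cons, pvRevStep, Option.map_some]
          have h1 : c + m - (c + p) = m - p := by omega
          have h2 : max (c + m) (c + p) = c + max m p := by omega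
          rw [h1, h2]
          exact ih (some (max m p)) _ _

-- the Python rbest after processing all of reversed(P) for nums
def rbOf (nums : List Int) : Option Int :=
  match nums with
  | [] => none
  | _ :: _ => some ((sufmax (pvStart nums)).headI)

theorem pvRev_char (nums : List Int) :
    (0 :: tailPsums 0 nums).reverse.foldl pvRevStep (none, none, [])
      = (some (pmax nums), rbOf nums, (sufmax (pvStart nums)).reverse) := by
  induction nums with
  | nil => simp [tailPsums, pvRevStep, pmax, rbOf, pvStart, sufmax]
  | cons x rest ih =>
      have hsh : tailPsums 0 (x :: rest) = (0 :: tailPsums 0 rest).map (x + ·) := by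
        rw [show tailPsums 0 (x :: rest) = (0 + x) :: tailPsums (0 + x) rest from rfl,
           show (0 : Int) + x = x + 0 from by omega, tailPsums_map, List.map_cons]
      have hs := pvRev_shift ((0 :: tailPsums 0 rest).reverse) x none none []
      simp only [Option.map_none] at hs
      rw [List.reverse_cons, hsh, ← List.map_reverse, List.foldl_append, hs, ih]
      simp only [Option.map_some, List.foldl_cons, List.foldl_nil, pvRevStep]
      cases rest with
      | nil =>
          simp [rbOf, pmax, pvStart, sufmax]
          omega
      | cons y r =>
          obtain ⟨a, t, hh⟩ : ∃ a t, pvStart (y :: r) = a :: t := by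
            cases hh : pvStart (y :: r) with
            | nil => exact absurd hh (pvStart_ne_nil y r)
            | cons a t => exact ⟨a, t, rfl⟩
          have hs0 : max x (x + (pvStart (y :: r)).headI) = x + pmax (y :: r) := by
            rw [pvStart_headI y r]; simp only [pmax]; omega
          have hps : pvStart (x :: y :: r) = (x + pmax (y :: r)) :: a :: t := by
            rw [show pvStart (x :: y :: r)
                  = max x (x + (pvStart (y :: r)).headI) :: pvStart (y :: r) from rfl, hs0, hh]
          simp only [rbOf, hh, hps]
          rw [show sufmax ((x + pmax (y :: r)) :: a :: t)
                = max (x + pmax (y :: r)) (sufmax (a :: t)).headI :: sufmax (a :: t) from rfl]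
          simp only [Prod.mk.injEq, Option.some.injEq, List.headI_cons, List.reverse_cons]
          refine ⟨?_, ?_, ?_⟩
          · simp only [pmax]; omega
          · rw [sub_zero, max_comm]
          · rw [show max ((sufmax (a :: t)).headI) (x + pmax (y :: r) - 0)
                  = max (x + pmax (y :: r)) ((sufmax (a :: t)).headI) from by
                rw [sub_zero, max_comm]]

-- drop 1 of the suffix-max list
theorem sufmax_drop (x : Int) (rest : List Int) :
    (sufmax (pvStart (x :: rest))).drop 1 = sufmax (pvStart rest) := by
  cases rest with
  | nil => simp [pvStart, sufmax]
  | cons y r =>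
      obtain ⟨a, t, hh⟩ : ∃ a t, pvStart (y :: r) = a :: t := by
        cases hh : pvStart (y :: r) with
        | nil => exact absurd hh (pvStart_ne_nil y r)
        | cons a t => exact ⟨a, t, rfl⟩
      simp [pvStart, hh, sufmax]

-- ---- combining fold = refmax ----

theorem foldmax_pull (q : List (Int × Int)) (i c : Int) :
    q.foldl (fun ans p => max ans (p.1 + p.2)) (max i c)
      = max c (q.foldl (fun ans p => max ans (p.1 + p.2)) i) := by
  induction q generalizing i with
  | nil => simp [max_comm]
  | cons p q ih =>
      simp only [List.foldl_cons]
      rw [show max (max i c) (p.1 + p.2) = max (max i (p.1 + p.2)) c by omega, ih]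

theorem foldB_refmax (ys ss : List Int) (e me : Int) (hlen : ys.length = ss.length) :
    (((me :: melist e me ys).dropLast).zip ss).foldl
        (fun ans p => max ans (p.1 + p.2)) ((me :: melist e me ys).getLastD 0)
      = refmax ys ss e me := by
  induction ys generalizing ss e me with
  | nil =>
      cases ss with
      | nil => simp [melist, refmax]
      | cons s ss => simp at hlen
  | cons y ys ih =>
      cases ss with
      | nil => simp at hlen
      | cons s ss =>
          simp only [melist, refmax, List.dropLast_cons₂, List.getLastD_cons,
            List.zip_cons_cons, List.foldl_cons]
          have ih' := ih ss (max y (e + y)) (max me (max y (e + y))) (by simpa using hlen)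
          simp only [List.getLastD_cons] at ih'
          rw [foldmax_pull, ih']

-- any element of ss, plus the entering me, is dominated by refmax
theorem refmax_mem_le (ss ys : List Int) (e me s : Int)
    (hs : s ∈ ss) (hlen : ss.length ≤ ys.length) :
    me + s ≤ refmax ys ss e me := by
  induction ss generalizing ys e me with
  | nil => simp at hs
  | cons s0 ss ih =>
      cases ys with
      | nil => simp at hlen
      | cons y ys =>
          simp only [refmax]
          rcases List.mem_cons.mp hs with h | h
          · subst h; omega
          · have := ih ys (max y (e + y)) (max me (max y (e + y))) h (by simpa using hlen)
            omega

-- replacing the start array by its suffix maxima does not change refmax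
theorem refmax_sufmax (ss ys : List Int) (e me : Int) (hlen : ss.length = ys.length) :
    refmax ys (sufmax ss) e me = refmax ys ss e me := by
  induction ss generalizing ys e me with
  | nil => simp [sufmax]
  | cons s0 ss ih =>
      cases ys with
      | nil => simp at hlen
      | cons y ys =>
          cases ss with
          | nil =>
              cases ys with
              | nil => simp [sufmax]
              | cons z zs => simp at hlen
          | cons s1 ss' =>
              cases ys with
              | nil => simp at hlen
              | cons z zs =>
                  simp only [sufmax, refmax]
                  rw [ih (z :: zs) (max y (e + y)) (max me (max y (e + y))) (by simpa using hlen)]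
                  simp only [refmax]
                  have hmem := sufmax_headI_mem (s1 :: ss') (by simp)
                  have hle := refmax_mem_le (s1 :: ss') (z :: zs) (max y (e + y))
                    (max me (max y (e + y))) ((sufmax (s1 :: ss')).headI) hmem
                    (by simp at hlen ⊢; omega)
                  simp only [refmax] at hle
                  omega

-- length of the me-trajectory
theorem melist_length (ys : List Int) (e me : Int) : (melist e me ys).length = ys.length := by
  induction ys generalizing e me with
  | nil => rfl
  | cons y r ih => simp [melist, ih]

-- zipping with a shorter list ignores the last element
theorem zip_dropLast (l s : List Int) (h : s.length < l.length) :
    l.zip s = l.dropLast.zip s := by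
  induction s generalizing l with
  | nil => simp
  | cons b s' ih =>
      cases l with
      | nil => simp at h
      | cons a l' =>
          cases l' with
          | nil => simp at h
          | cons a' l'' =>
              simp only [List.zip_cons_cons, List.dropLast_cons₂]
              rw [ih (a' :: l'') (by simp at h ⊢; omega)]

-- ===== VERDICT (by name: the statement is the Claim_ definition above) =====
theorem max_sum_reverse2_spec : Claim_equal_max_sum_reverse2 := by
  unfold Claim_equal_max_sum_reverse2
  intro nums _ hpre
  unfold Spec_max_sum_reverse2
  match nums with
  | [] => exact absurd rfl hpre
  | x :: rest =>
      rw [A_eq_refmax]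
      simp only [max_sum_reverse2_alt, pvRev, pvPrefP_eq, pvLeft_eq, pvRev_char,
        List.reverse_reverse, sufmax_drop]
      rw [zip_dropLast (x :: melist x x rest) (sufmax (pvStart rest))
            (by simp [melist_length, sufmax_length, pvStart_length])]
      rw [foldB_refmax rest (sufmax (pvStart rest)) x x
            (by simp [sufmax_length, pvStart_length])]
      rw [refmax_sufmax (pvStart rest) rest x x (by simp [pvStart_length])]
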